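-- pv_equiv track=rewrite | github.com/xldeveloper/openclaw-skills | skills/visionik/ouracli/src/ouracli/format_utils.py | sort_dict_keys
-- ===== SOURCE A (Python) =====
-- from typing import Any
--
-- FIELD_ORDER = [
--     "day",
--     "date",
--     "timestamp",
--     "score",
-- ]
--
-- FIELD_ORDER_END = [
--     "met",
-- ]
--
-- def sort_dict_keys(d: dict[str, Any]) -> list[str]:
--     """
--     Sort dictionary keys with priority fields first, then alphabetically, then end fields last.
--
--     Args:
--         d: Dictionary to sort
--
--     Returns:
--         Sorted list of keys
--     """
--     keys = list(d.keys())
--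
--     # Separate priority, end, and other keys
--     priority_keys = []
--     end_keys = []
--     other_keys = []
--
--     for key in keys:
--         if key in FIELD_ORDER:
--             priority_keys.append(key)
--         elif key in FIELD_ORDER_END:
--             end_keys.append(key)
--         else:
--             other_keys.append(key)
--
--     # Sort priority keys by their order in FIELD_ORDER
--     priority_keys.sort(key=lambda k: FIELD_ORDER.index(k) if k in FIELD_ORDER else len(FIELD_ORDER))
--
--     # Sort end keys by their order in FIELD_ORDER_END
--     end_keys.sort(
--         key=lambda k: FIELD_ORDER_END.index(k) if k in FIELD_ORDER_END else len(FIELD_ORDER_END)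
--     )
--
--     # Sort other keys alphabetically
--     other_keys.sort()
--
--     return priority_keys + other_keys + end_keys
-- ===== SOURCE B (Python) =====
-- from typing import Any
--
-- FIELD_ORDER = [
--     "day",
--     "date",
--     "timestamp",
--     "score",
-- ]
--
-- FIELD_ORDER_END = [
--     "met",
-- ]
--
--
-- def _rank(k):
--     """Composite sort key: a numeric bucket, then the key itself.
--
--     Priority fields get buckets 0..len(FIELD_ORDER)-1 (their FIELD_ORDER position),
--     every other key shares bucket len(FIELD_ORDER) and is ordered alphabetically
--     by the second component, end fields get the buckets after that."""
--     if k in FIELD_ORDER: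
--         bucket = FIELD_ORDER.index(k)
--     elif k in FIELD_ORDER_END:
--         bucket = len(FIELD_ORDER) + 1 + FIELD_ORDER_END.index(k)
--     else:
--         bucket = len(FIELD_ORDER)
--     return (bucket, k)
--
--
-- def sort_dict_keys(d: dict[str, Any]) -> list[str]:
--     """Single keyed sort: priority fields first (in FIELD_ORDER order), other
--     keys alphabetically, end fields last."""
--     return sorted(d.keys(), key=_rank)
-- ===== Notes on version B (the rewrite author's own statement) =====
-- stated objective: simpler
-- what changed: Replaced the partition-into-three-lists loop plus three separate sorts plus concatenation by a single sorted() call with a composite rank key whose first component segregates the three groups.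
import Mathlib
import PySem

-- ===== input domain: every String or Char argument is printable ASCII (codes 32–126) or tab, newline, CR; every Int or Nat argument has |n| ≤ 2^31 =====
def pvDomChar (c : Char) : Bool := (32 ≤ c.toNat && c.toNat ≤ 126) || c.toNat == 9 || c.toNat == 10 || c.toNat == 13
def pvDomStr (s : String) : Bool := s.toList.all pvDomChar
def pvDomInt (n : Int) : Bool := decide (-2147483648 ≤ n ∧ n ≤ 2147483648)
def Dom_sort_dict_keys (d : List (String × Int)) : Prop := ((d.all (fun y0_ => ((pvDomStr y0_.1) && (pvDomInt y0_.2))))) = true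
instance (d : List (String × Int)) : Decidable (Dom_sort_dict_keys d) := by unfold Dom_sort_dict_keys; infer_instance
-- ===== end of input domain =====

-- B replaces A's partition-into-three-lists loop + three sorts + concatenation by one
-- keyed sort with a composite rank key (objective: simpler).

-- ===== PORT A =====
-- module-level constants, shared by both programs
def FIELD_ORDER : List String := ["day", "date", "timestamp", "score"]
def FIELD_ORDER_END : List String := ["met"]

-- 'lambda k: FIELD_ORDER.index(k) if k in FIELD_ORDER else len(FIELD_ORDER)'
-- (.index never raises here because it is guarded by the membership test, so .getD is exact)
def pvPriKey (k : String) : Nat :=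
  if FIELD_ORDER.contains k then (PySem.List.index? FIELD_ORDER k).getD FIELD_ORDER.length
  else FIELD_ORDER.length

def pvEndKey (k : String) : Nat :=
  if FIELD_ORDER_END.contains k then (PySem.List.index? FIELD_ORDER_END k).getD FIELD_ORDER_END.length
  else FIELD_ORDER_END.length

def sort_dict_keys (d : List (String × Int)) : List String :=
  -- keys = list(d.keys()): distinct keys in first-insertion order
  let keys := PySem.List.dedup (d.map Prod.fst)
  -- the partition loop, state (priority_keys, end_keys, other_keys)
  let acc := keys.foldl
    (fun (acc : List String × List String × List String) key =>
      if FIELD_ORDER.contains key then (acc.1 ++ [key], acc.2.1, acc.2.2)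
      else if FIELD_ORDER_END.contains key then (acc.1, acc.2.1 ++ [key], acc.2.2)
      else (acc.1, acc.2.1, acc.2.2 ++ [key]))
    ([], [], [])
  PySem.List.sorted acc.1 pvPriKey
    ++ PySem.List.sorted acc.2.2 (fun k => k)
    ++ PySem.List.sorted acc.2.1 pvEndKey

-- ===== PORT B =====
-- _rank(k): a Python 2-tuple (bucket, k); ported as the lexicographic pair Lex (ℕ × String),
-- whose order is exactly Python's tuple order on (int, str).
-- (.index is guarded by the membership tests, so .getD is exact, as in port A)
def pvRank (k : String) : Lex (ℕ × String) :=
  if FIELD_ORDER.contains k then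
    toLex ((PySem.List.index? FIELD_ORDER k).getD 0, k)
  else if FIELD_ORDER_END.contains k then
    toLex (FIELD_ORDER.length + 1 + (PySem.List.index? FIELD_ORDER_END k).getD 0, k)
  else
    toLex (FIELD_ORDER.length, k)

def sort_dict_keys_alt (d : List (String × Int)) : List String :=
  PySem.List.sorted (PySem.List.dedup (d.map Prod.fst)) pvRank

-- ===== PRECONDITION & SPEC =====
def Spec_sort_dict_keys (d : List (String × Int)) (out : List String) : Prop := out = sort_dict_keys_alt d
instance (d : List (String × Int)) (out : List String) : Decidable (Spec_sort_dict_keys d out) := by unfold Spec_sort_dict_keys; infer_instance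

-- ===== CLAIM (what is proved, stated in full; the proofs are below) =====
def Claim_equal_sort_dict_keys : Prop := ∀ (d : List (String × Int)), Dom_sort_dict_keys d → Spec_sort_dict_keys d (sort_dict_keys d)

-- ===== LEMMAS AND PROOFS =====

-- the partition loop computes the three filters of the key list
theorem pv_partition (ks : List String) (p e o : List String) :
    ks.foldl
      (fun (acc : List String × List String × List String) key =>
        if FIELD_ORDER.contains key then (acc.1 ++ [key], acc.2.1, acc.2.2)
        else if FIELD_ORDER_END.contains key then (acc.1, acc.2.1 ++ [key], acc.2.2)
        else (acc.1, acc.2.1, acc.2.2 ++ [key]))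
      (p, e, o)
    = (p ++ ks.filter (fun k => FIELD_ORDER.contains k),
       e ++ ks.filter (fun k => !FIELD_ORDER.contains k && FIELD_ORDER_END.contains k),
       o ++ ks.filter (fun k => !FIELD_ORDER.contains k && !FIELD_ORDER_END.contains k)) := by
  induction ks generalizing p e o with
  | nil => simp
  | cons k ks ih =>
    by_cases h1 : k ∈ FIELD_ORDER
    · rw [List.foldl_cons, if_pos (by simpa using h1), ih]
      simp [h1]
    · by_cases h2 : k ∈ FIELD_ORDER_END
      · rw [List.foldl_cons, if_neg (by simpa using h1), if_pos (by simpa using h2), ih]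
        simp [h1, h2]
      · rw [List.foldl_cons, if_neg (by simpa using h1), if_neg (by simpa using h2), ih]
        simp [h1, h2]

-- the three filters, concatenated in any group order, are a permutation of the list
theorem pv_perm3 (ks : List String) :
    (ks.filter (fun k => FIELD_ORDER.contains k)
      ++ ks.filter (fun k => !FIELD_ORDER.contains k && !FIELD_ORDER_END.contains k)
      ++ ks.filter (fun k => !FIELD_ORDER.contains k && FIELD_ORDER_END.contains k)).Perm ks := by
  induction ks with
  | nil => simp
  | cons k ks ih =>
    by_cases h1 : k ∈ FIELD_ORDER
    · refine List.Perm.trans ?_ (ih.cons k)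
      simp [h1]
    · by_cases h2 : k ∈ FIELD_ORDER_END
      · refine List.Perm.trans ?_ (ih.cons k)
        simp only [List.filter_cons, List.append_assoc]
        simpa [h1, h2] using
          (List.perm_middle (a := k)
            (l₁ := ks.filter (fun k => FIELD_ORDER.contains k)
              ++ ks.filter (fun k => !FIELD_ORDER.contains k && !FIELD_ORDER_END.contains k))
            (l₂ := ks.filter (fun k => !FIELD_ORDER.contains k && FIELD_ORDER_END.contains k)))
      · refine List.Perm.trans ?_ (ih.cons k)
        simp only [List.filter_cons, List.append_assoc]
        simp [h1, h2]

-- pvRank orders two distinct priority keys like pvPriKey does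
theorem pv_rank_pri {a b : String} (ha : a ∈ FIELD_ORDER) (hb : b ∈ FIELD_ORDER)
    (hle : pvPriKey a ≤ pvPriKey b) (hne : a ≠ b) : pvRank a < pvRank b := by
  simp only [FIELD_ORDER, List.mem_cons, List.not_mem_nil, or_false] at ha hb
  rcases ha with rfl | rfl | rfl | rfl <;> rcases hb with rfl | rfl | rfl | rfl <;>
    first
    | exact absurd rfl hne
    | exact absurd hle (by decide)
    | decide

-- pvRank orders two distinct end keys (vacuous: FIELD_ORDER_END is a singleton)
theorem pv_rank_end {a b : String} (ha : a ∈ FIELD_ORDER_END) (hb : b ∈ FIELD_ORDER_END)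
    (hne : a ≠ b) : pvRank a < pvRank b := by
  simp only [FIELD_ORDER_END, List.mem_cons, List.not_mem_nil, or_false] at ha hb
  subst ha hb; exact absurd rfl hne

-- pvRank on a middle (other) key
theorem pv_rank_other {k : String} (h1 : k ∉ FIELD_ORDER) (h2 : k ∉ FIELD_ORDER_END) :
    pvRank k = toLex (FIELD_ORDER.length, k) := by
  simp [pvRank, h1, h2]

theorem pv_rank_pri_lt_other {a b : String} (ha : a ∈ FIELD_ORDER)
    (h1 : b ∉ FIELD_ORDER) (h2 : b ∉ FIELD_ORDER_END) : pvRank a < pvRank b := by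
  rw [pv_rank_other h1 h2]
  simp only [FIELD_ORDER, List.mem_cons, List.not_mem_nil, or_false] at ha
  rcases ha with rfl | rfl | rfl | rfl
  · rw [show pvRank "day" = toLex (0, "day") from by decide]
    simp [Prod.Lex.toLex_lt_toLex, FIELD_ORDER]
  · rw [show pvRank "date" = toLex (1, "date") from by decide]
    simp [Prod.Lex.toLex_lt_toLex, FIELD_ORDER]
  · rw [show pvRank "timestamp" = toLex (2, "timestamp") from by decide]
    simp [Prod.Lex.toLex_lt_toLex, FIELD_ORDER]
  · rw [show pvRank "score" = toLex (3, "score") from by decide]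
    simp [Prod.Lex.toLex_lt_toLex, FIELD_ORDER]

theorem pv_rank_pri_lt_end {a b : String} (ha : a ∈ FIELD_ORDER) (hb : b ∈ FIELD_ORDER_END) :
    pvRank a < pvRank b := by
  simp only [FIELD_ORDER, FIELD_ORDER_END, List.mem_cons, List.not_mem_nil, or_false] at ha hb
  rcases ha with rfl | rfl | rfl | rfl <;> (subst hb; decide)

theorem pv_rank_other_lt_end {a b : String} (h1 : a ∉ FIELD_ORDER) (h2 : a ∉ FIELD_ORDER_END)
    (hb : b ∈ FIELD_ORDER_END) : pvRank a < pvRank b := by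
  simp only [FIELD_ORDER_END, List.mem_cons, List.not_mem_nil, or_false] at hb
  subst hb
  rw [pv_rank_other h1 h2, show pvRank "met" = toLex (5, "met") from by decide]
  simp [Prod.Lex.toLex_lt_toLex, FIELD_ORDER]

theorem pv_rank_other_lt_other {a b : String} (ha1 : a ∉ FIELD_ORDER) (ha2 : a ∉ FIELD_ORDER_END)
    (hb1 : b ∉ FIELD_ORDER) (hb2 : b ∉ FIELD_ORDER_END) (hle : a ≤ b) (hne : a ≠ b) :
    pvRank a < pvRank b := by
  rw [pv_rank_other ha1 ha2, pv_rank_other hb1 hb2]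
  simp [Prod.Lex.toLex_lt_toLex, lt_of_le_of_ne hle hne]

-- ===== VERDICT (by name: the statement is the Claim_ definition above) =====
theorem sort_dict_keys_spec : Claim_equal_sort_dict_keys := by
  unfold Claim_equal_sort_dict_keys
  intro d _
  unfold Spec_sort_dict_keys sort_dict_keys sort_dict_keys_alt
  set ks := PySem.List.dedup (d.map Prod.fst) with hks
  simp only [pv_partition, List.nil_append]
  set P := ks.filter (fun k => FIELD_ORDER.contains k) with hP
  set E := ks.filter (fun k => !FIELD_ORDER.contains k && FIELD_ORDER_END.contains k) with hE
  set O := ks.filter (fun k => !FIELD_ORDER.contains k && !FIELD_ORDER_END.contains k) with hO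
  have hnodup : ks.Nodup := PySem.List.nodup_dedup _
  -- memberships of the sorted pieces
  have memP : ∀ a ∈ PySem.List.sorted P pvPriKey, a ∈ FIELD_ORDER := by
    intro a hmem
    have := (PySem.List.sorted_perm P pvPriKey false).mem_iff.mp hmem
    have h := (List.mem_filter.mp (hP ▸ this)).2
    simpa using h
  have memE : ∀ a ∈ PySem.List.sorted E pvEndKey, a ∉ FIELD_ORDER ∧ a ∈ FIELD_ORDER_END := by
    intro a hmem
    have := (PySem.List.sorted_perm E pvEndKey false).mem_iff.mp hmem
    have h := (List.mem_filter.mp (hE ▸ this)).2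
    simpa using h
  have memO : ∀ a ∈ PySem.List.sorted O (fun k => k),
      a ∉ FIELD_ORDER ∧ a ∉ FIELD_ORDER_END := by
    intro a hmem
    have := (PySem.List.sorted_perm O (fun k => k) false).mem_iff.mp hmem
    have h := (List.mem_filter.mp (hO ▸ this)).2
    simpa using h
  -- the concatenation is a permutation of ks
  have hperm : (PySem.List.sorted P pvPriKey ++ PySem.List.sorted O (fun k => k)
      ++ PySem.List.sorted E pvEndKey).Perm ks := by
    exact (((PySem.List.sorted_perm P pvPriKey false).append
      (PySem.List.sorted_perm O (fun k => k) false)).append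
        (PySem.List.sorted_perm E pvEndKey false)).trans (pv_perm3 ks)
  -- strict pairwise ordering of the concatenation under pvRank
  have hpwP : (PySem.List.sorted P pvPriKey).Pairwise (fun a b => pvRank a < pvRank b) := by
    have hle := PySem.List.sorted_pairwise P pvPriKey
    have hnd : (PySem.List.sorted P pvPriKey).Nodup :=
      ((PySem.List.sorted_perm P pvPriKey false).nodup_iff).mpr (hnodup.filter _)
    refine (hle.and hnd).imp_of_mem ?_
    intro a b hma hmb hab
    exact pv_rank_pri (memP a hma) (memP b hmb) hab.1 hab.2
  have hpwO : (PySem.List.sorted O (fun k => k)).Pairwise (fun a b => pvRank a < pvRank b) := by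
    have hle := PySem.List.sorted_pairwise O (fun k => k)
    have hnd : (PySem.List.sorted O (fun k => k)).Nodup :=
      ((PySem.List.sorted_perm O (fun k => k) false).nodup_iff).mpr (hnodup.filter _)
    refine (hle.and hnd).imp_of_mem ?_
    intro a b hma hmb hab
    exact pv_rank_other_lt_other (memO a hma).1 (memO a hma).2 (memO b hmb).1 (memO b hmb).2
      hab.1 hab.2
  have hpwE : (PySem.List.sorted E pvEndKey).Pairwise (fun a b => pvRank a < pvRank b) := by
    have hnd : (PySem.List.sorted E pvEndKey).Nodup :=
      ((PySem.List.sorted_perm E pvEndKey false).nodup_iff).mpr (hnodup.filter _)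
    refine hnd.imp_of_mem ?_
    intro a b hma hmb hab
    exact pv_rank_end (memE a hma).2 (memE b hmb).2 hab
  have hpw : (PySem.List.sorted P pvPriKey ++ PySem.List.sorted O (fun k => k)
      ++ PySem.List.sorted E pvEndKey).Pairwise (fun a b => pvRank a < pvRank b) := by
    rw [List.pairwise_append, List.pairwise_append]
    refine ⟨⟨hpwP, hpwO, ?_⟩, hpwE, ?_⟩
    · intro a hma b hmb
      exact pv_rank_pri_lt_other (memP a hma) (memO b hmb).1 (memO b hmb).2
    · intro a hma b hmb
      rcases List.mem_append.mp hma with ha | ha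
      · exact pv_rank_pri_lt_end (memP a ha) (memE b hmb).2
      · exact pv_rank_other_lt_end (memO a ha).1 (memO a ha).2 (memE b hmb).2
  exact (PySem.List.sorted_eq_of_perm_of_pairwise_lt ks _ pvRank hperm hpw).symm
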